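-- pv_equiv track=rewrite | github.com/inz1981/AoC | 2020/13/13.py | get_timetable
-- ===== SOURCE A (Python) =====
-- def get_timetable(busses, max_roundtrip, start_time):
--     time = 0
--     timetable = []
--     for bus in busses:
--         curr_bus = []
--         for time in range(0, max_roundtrip + start_time):
--             if time == 0:
--                 curr_bus.append((bus, time, "D"))
--             elif not (time % bus):
--                 curr_bus.append((bus, time, "D"))
--             else:
--                 curr_bus.append((bus, time, "."))
--         timetable.append(curr_bus)
--     return timetable
-- ===== SOURCE B (Python) =====
-- def get_timetable(busses, max_roundtrip, start_time):
--     n = max_roundtrip + start_time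
--     timetable = []
--     for bus in busses:
--         row = [(bus, t, ".") for t in range(n)]
--         for t in range(0, n, abs(bus)):
--             row[t] = (bus, t, "D")
--         timetable.append(row)
--     return timetable
-- ===== Notes on version B (the rewrite author's own statement) =====
-- stated objective: alternative
-- what changed: B builds each row filled with '.' cells in one pass and then overwrites only the departure cells with a strided loop over range(0, n, abs(bus)), replacing A's per-cell modulo test inside the time loop.
-- outside the precondition, e.g. on get_timetable([0], 1, 0): A returns [[(0, 0, 'D')]], B raises ValueError; on get_timetable([0], 0, 0): A returns [[]], B raises ValueError
import Mathlib
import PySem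

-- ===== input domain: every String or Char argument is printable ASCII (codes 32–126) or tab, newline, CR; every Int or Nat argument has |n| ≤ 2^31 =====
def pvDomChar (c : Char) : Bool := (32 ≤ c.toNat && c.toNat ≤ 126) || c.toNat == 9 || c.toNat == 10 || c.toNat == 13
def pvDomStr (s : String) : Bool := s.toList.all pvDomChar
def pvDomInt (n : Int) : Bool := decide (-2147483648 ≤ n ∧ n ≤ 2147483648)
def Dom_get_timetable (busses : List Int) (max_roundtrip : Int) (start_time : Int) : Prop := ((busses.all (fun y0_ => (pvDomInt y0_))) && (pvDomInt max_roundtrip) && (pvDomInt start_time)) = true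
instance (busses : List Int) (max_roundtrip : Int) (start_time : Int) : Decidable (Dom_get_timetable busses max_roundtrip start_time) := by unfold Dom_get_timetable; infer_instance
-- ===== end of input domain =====

-- B replaces A's per-cell modulo test by a default-filled row overwritten along a stride of |bus| (different decomposition, same cost class).

-- ===== PORT A =====
def get_timetable (busses : List Int) (max_roundtrip : Int) (start_time : Int) : List (List (Int × Int × String)) :=
  busses.foldl (fun timetable bus =>
    let curr_bus := (PySem.List.pyRange 0 (max_roundtrip + start_time) 1).foldl
      (fun acc time =>
        if time = 0 then acc ++ [(bus, time, "D")]
        else if PySem.Int.mod time bus = 0 then acc ++ [(bus, time, "D")]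
        else acc ++ [(bus, time, ".")]) []
    timetable ++ [curr_bus]) []

-- ===== PORT B =====
def get_timetable_alt (busses : List Int) (max_roundtrip : Int) (start_time : Int) : List (List (Int × Int × String)) :=
  let n := max_roundtrip + start_time  -- n is the only use of the two parameters, as in Source B
  busses.foldl (fun timetable bus =>
    let row := (PySem.List.pyRange 0 n 1).map (fun t => (bus, t, "."))
    let row := (PySem.List.pyRange 0 n |bus|).foldl
      (fun r t => PySem.List.pySetD r t (bus, t, "D")) row
    timetable ++ [row]) []

-- ===== PRECONDITION & SPEC =====
-- Pre_ excludes bus lists containing 0: A raises ZeroDivisionError as soon as any time ≥ 1 is generated,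
-- and in the degenerate cases (max_roundtrip + start_time ≤ 1) where A still returns, B's own strided
-- range(0, n, 0) raises ValueError, so B cannot match there.
def Pre_get_timetable (busses : List Int) (max_roundtrip : Int) (start_time : Int) : Prop :=
  (0 : Int) ∉ busses
instance (busses : List Int) (max_roundtrip : Int) (start_time : Int) : Decidable (Pre_get_timetable busses max_roundtrip start_time) := by unfold Pre_get_timetable; infer_instance

def pvWitness_get_timetable : List Int × Int × Int := ([3, 5], 4, 2)

def Spec_get_timetable (busses : List Int) (max_roundtrip : Int) (start_time : Int) (out : List (List (Int × Int × String))) : Prop := out = get_timetable_alt busses max_roundtrip start_time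
instance (busses : List Int) (max_roundtrip : Int) (start_time : Int) (out : List (List (Int × Int × String))) : Decidable (Spec_get_timetable busses max_roundtrip start_time out) := by unfold Spec_get_timetable; infer_instance

-- ===== CLAIM (what is proved, stated in full; the proofs are below) =====
def Claim_equal_get_timetable : Prop := ∀ (busses : List Int) (max_roundtrip : Int) (start_time : Int), Dom_get_timetable busses max_roundtrip start_time → Pre_get_timetable busses max_roundtrip start_time → Spec_get_timetable busses max_roundtrip start_time (get_timetable busses max_roundtrip start_time)

-- ===== LEMMAS AND PROOFS =====

-- a snoc-fold is a map
theorem pv_foldl_snoc_eq_map {α β : Type} (f : α → β) (l : List α) (acc : List β) :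
    l.foldl (fun a t => a ++ [f t]) acc = acc ++ l.map f := by
  induction l generalizing acc with
  | nil => simp
  | cons x l ih => simp [ih]

-- the cell A writes at time t
def pv_cellA (bus t : Int) : Int × Int × String :=
  (bus, t, if t = 0 then "D" else if PySem.Int.mod t bus = 0 then "D" else ".")

theorem pv_cellA_eq_dvd (bus t : Int) :
    pv_cellA bus t = (bus, t, if bus ∣ t then "D" else ".") := by
  unfold pv_cellA
  by_cases h0 : t = 0
  · subst h0; simp
  · simp only [h0, if_false]
    by_cases hd : bus ∣ t
    · simp [hd, (PySem.Int.mod_eq_zero_iff_dvd t bus).2 hd]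
    · have : ¬ PySem.Int.mod t bus = 0 := fun h => hd ((PySem.Int.mod_eq_zero_iff_dvd t bus).1 h)
      simp [hd, this]

-- scattering g t at every index t ∈ I (all nonnegative) into xs, read back cell-wise
theorem pv_scatter_getElem? {α : Type} (g : Int → α) (I : List Int) (xs : List α) (k : Nat)
    (h : ∀ t ∈ I, 0 ≤ t) :
    (I.foldl (fun acc t => PySem.List.pySetD acc t (g t)) xs)[k]? =
      if ((k : Int) ∈ I ∧ k < xs.length) then some (g (k : Int)) else xs[k]? := by
  induction I generalizing xs with
  | nil => simp
  | cons t I ih =>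
    have ht : 0 ≤ t := h t (by simp)
    have h' : ∀ u ∈ I, 0 ≤ u := fun u hu => h u (by simp [hu])
    simp only [List.foldl_cons, PySem.List.pySetD_of_nonneg _ _ ht, List.mem_cons]
    rw [ih _ h']
    simp only [List.length_set, List.getElem?_set]
    by_cases hk : (k : Int) = t
    · subst hk
      simp only [Int.toNat_natCast]
      by_cases hlt : k < xs.length
      · by_cases hmem : (k : Int) ∈ I <;> simp [hlt, hmem]
      · have h1 : xs[k]? = none := List.getElem?_eq_none (by omega)
        by_cases hmem : (k : Int) ∈ I <;> simp [hlt, hmem, h1]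
    · have htk : t.toNat ≠ k := by omega
      by_cases hlt : k < xs.length
      · by_cases hmem : (k : Int) ∈ I <;> simp [hk, hmem, hlt, htk]
      · have h1 : xs[k]? = none := List.getElem?_eq_none (by omega)
        by_cases hmem : (k : Int) ∈ I <;> simp [hk, hmem, hlt, htk, h1]

-- both row builders produce the same row for a nonzero bus
theorem pv_row_eq (bus n : Int) (hb : bus ≠ 0) :
    ((PySem.List.pyRange 0 n |bus|).foldl
        (fun r t => PySem.List.pySetD r t (bus, t, "D"))
        ((PySem.List.pyRange 0 n 1).map (fun t => (bus, t, ".")))) =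
      (PySem.List.pyRange 0 n 1).foldl
        (fun acc time =>
          if time = 0 then acc ++ [(bus, time, "D")]
          else if PySem.Int.mod time bus = 0 then acc ++ [(bus, time, "D")]
          else acc ++ [(bus, time, ".")]) [] := by
  have hstep : (fun (acc : List (Int × Int × String)) time =>
      if time = 0 then acc ++ [(bus, time, "D")]
      else if PySem.Int.mod time bus = 0 then acc ++ [(bus, time, "D")]
      else acc ++ [(bus, time, ".")]) = (fun acc t => acc ++ [pv_cellA bus t]) := by
    funext acc t
    unfold pv_cellA
    split_ifs <;> rfl
  rw [hstep, pv_foldl_snoc_eq_map, List.nil_append]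
  have habs : 0 < |bus| := abs_pos.mpr hb
  apply List.ext_getElem?
  intro k
  rw [pv_scatter_getElem? (fun t => (bus, t, "D")) _ _ k
    (fun t htm => ((PySem.List.mem_pyRange_iff_of_pos habs t).1 htm).1)]
  have hmem : ((k : Int) ∈ PySem.List.pyRange 0 n |bus|) ↔ ((k : Int) < n ∧ bus ∣ (k : Int)) := by
    rw [PySem.List.mem_pyRange_iff_of_pos habs]
    constructor
    · rintro ⟨-, h2, h3⟩; exact ⟨h2, by simpa using (abs_dvd bus (k : Int)).1 (by simpa using h3)⟩
    · rintro ⟨h2, h3⟩; exact ⟨by positivity, h2, by simpa using (abs_dvd bus (k : Int)).2 h3⟩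
  rw [PySem.List.pyRange_one]
  simp only [List.map_map, List.getElem?_map, List.length_map, List.length_range, sub_zero]
  by_cases hk : k < n.toNat
  · have hkn : (k : Int) < n := by omega
    rw [List.getElem?_range hk]
    simp only [Option.map_some, Function.comp_apply, zero_add, pv_cellA_eq_dvd]
    by_cases hd : bus ∣ (k : Int)
    · simp [hmem, hkn, hk, hd]
    · simp [hmem, hkn, hk, hd]
  · have hkn : ¬ ((k : Int) < n) := by omega
    simp [hmem, hkn, hk]

-- ===== VERDICT (by name: the statement is the Claim_ definition above) =====
theorem get_timetable_spec : Claim_equal_get_timetable := by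
  intro busses m s _ hpre
  unfold Spec_get_timetable get_timetable get_timetable_alt
  rw [pv_foldl_snoc_eq_map, pv_foldl_snoc_eq_map, List.nil_append, List.nil_append]
  apply List.map_congr_left
  intro bus hbus
  have hb : bus ≠ 0 := fun h => hpre (h ▸ hbus)
  exact (pv_row_eq bus (m + s) hb).symm
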